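-- pv_equiv track=rewrite | github.com/ksusonic/fortnite-collect-bot | bot/status.py | _derive_indicator
-- ===== SOURCE A (Python) =====
-- _STATUS_TO_INDICATOR = {
--     "operational": "none",
--     "under_maintenance": "minor",
--     "degraded_performance": "minor",
--     "partial_outage": "major",
--     "major_outage": "critical",
-- }
--
-- _INDICATOR_SEVERITY = {"none": 0, "minor": 1, "major": 2, "critical": 3}
--
-- def _derive_indicator(statuses: list[str]) -> tuple[str, list[str]]:
--     worst = "none"
--     problems: list[str] = []
--     for name, status in statuses:
--         ind = _STATUS_TO_INDICATOR.get(status, "none")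
--         if _INDICATOR_SEVERITY[ind] > _INDICATOR_SEVERITY[worst]:
--             worst = ind
--         if status != "operational":
--             problems.append(f"{name}: {status.replace('_', ' ')}")
--     return worst, problems
-- ===== SOURCE B (Python) =====
-- _STATUS_TO_INDICATOR = {
--     "operational": "none",
--     "under_maintenance": "minor",
--     "degraded_performance": "minor",
--     "partial_outage": "major",
--     "major_outage": "critical",
-- }
--
-- _INDICATOR_SEVERITY = {"none": 0, "minor": 1, "major": 2, "critical": 3}
--
--
-- def _problems(statuses):
--     """Problem lines, built by structural recursion on the list."""
--     if not statuses:
--         return []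
--     (name, status), rest = statuses[0], statuses[1:]
--     tail = _problems(rest)
--     if status == "operational":
--         return tail
--     return [f"{name}: {status.replace('_', ' ')}"] + tail
--
--
-- def _derive_indicator(statuses: list[str]) -> tuple[str, list[str]]:
--     # No severity ranks or max-tracking at all: collect the set of statuses
--     # present, then decide the worst indicator by membership tests in
--     # descending order of severity (unknown statuses map to "none").
--     present = {status for _, status in statuses}
--     if "major_outage" in present:
--         worst = "critical"
--     elif "partial_outage" in present:
--         worst = "major"
--     elif "under_maintenance" in present or "degraded_performance" in present:
--         worst = "minor"
--     else:
--         worst = "none"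
--     return worst, _problems(statuses)
-- ===== Notes on version B (the rewrite author's own statement) =====
-- stated objective: alternative
-- what changed: Drops the numeric severity ranking and max-tracking entirely: B collects the set of statuses present and picks the worst indicator by short-circuit membership tests in descending severity order, and builds the problem lines by structural recursion instead of the imperative append loop.
import Mathlib
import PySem

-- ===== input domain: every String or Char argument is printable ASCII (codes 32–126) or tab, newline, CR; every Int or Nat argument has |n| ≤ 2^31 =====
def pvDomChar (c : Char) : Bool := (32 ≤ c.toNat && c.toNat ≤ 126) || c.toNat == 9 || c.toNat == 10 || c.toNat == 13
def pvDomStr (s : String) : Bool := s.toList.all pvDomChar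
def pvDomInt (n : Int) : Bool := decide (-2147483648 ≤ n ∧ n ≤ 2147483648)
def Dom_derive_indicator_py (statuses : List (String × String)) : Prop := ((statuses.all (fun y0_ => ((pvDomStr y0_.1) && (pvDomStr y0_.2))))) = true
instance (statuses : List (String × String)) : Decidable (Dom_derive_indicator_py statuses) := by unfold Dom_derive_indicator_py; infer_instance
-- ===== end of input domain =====

-- B replaces A's severity-rank max-tracking by set membership tests in descending severity
-- order, and builds the problem lines by structural recursion; same cost, different algorithm.


-- shared module constants (A's module-level dicts)
def pvStatusToIndicator : PySem.Dict String String :=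
  PySem.Dict.mk [("operational", "none"), ("under_maintenance", "minor"), ("degraded_performance", "minor"),
   ("partial_outage", "major"), ("major_outage", "critical")]

def pvIndicatorSeverity : PySem.Dict String Int :=
  PySem.Dict.mk [("none", 0), ("minor", 1), ("major", 2), ("critical", 3)]

-- _INDICATOR_SEVERITY[ind]: the key is always an indicator name, so getD's default 0 is never reached.
def pvSev (ind : String) : Int := PySem.Dict.getD pvIndicatorSeverity ind 0

def pvFmt (name status : String) : String := name ++ ": " ++ PySem.Str.replace status "_" " "

-- ===== PORT A =====
def derive_indicator_py (statuses : List (String × String)) : String × List String :=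
  statuses.foldl
    (fun (acc : String × List String) p =>
      let ind := PySem.Dict.getD pvStatusToIndicator p.2 "none"
      let worst := if pvSev ind > pvSev acc.1 then ind else acc.1
      let problems := if p.2 ≠ "operational" then acc.2 ++ [pvFmt p.1 p.2] else acc.2
      (worst, problems))
    ("none", [])

-- ===== PORT B =====
-- _problems: structural recursion on the list
def pvProblems : List (String × String) → List String
  | [] => []
  | p :: rest =>
      let tail := pvProblems rest
      if p.2 == "operational" then tail else pvFmt p.1 p.2 :: tail

def derive_indicator_py_alt (statuses : List (String × String)) : String × List String :=
  let present : PySem.Set String := PySem.Set.ofList (statuses.map (fun p => p.2))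
  let worst :=
    if PySem.Set.contains present "major_outage" then "critical"
    else if PySem.Set.contains present "partial_outage" then "major"
    else if PySem.Set.contains present "under_maintenance" || PySem.Set.contains present "degraded_performance" then "minor"
    else "none"
  (worst, pvProblems statuses)

-- ===== PRECONDITION & SPEC =====
def Spec_derive_indicator_py (statuses : List (String × String)) (out : String × List String) : Prop := out = derive_indicator_py_alt statuses
instance (statuses : List (String × String)) (out : String × List String) : Decidable (Spec_derive_indicator_py statuses out) := by unfold Spec_derive_indicator_py; infer_instance

-- ===== CLAIM (what is proved, stated in full; the proofs are below) =====
def Claim_equal_derive_indicator_py : Prop := ∀ (statuses : List (String × String)), Dom_derive_indicator_py statuses → Spec_derive_indicator_py statuses (derive_indicator_py statuses)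

-- ===== LEMMAS AND PROOFS =====

-- A's loop body, named (definitionally equal to the lambda in the port)
def pvStep (acc : String × List String) (p : String × String) : String × List String :=
  let ind := PySem.Dict.getD pvStatusToIndicator p.2 "none"
  let worst := if pvSev ind > pvSev acc.1 then ind else acc.1
  let problems := if p.2 ≠ "operational" then acc.2 ++ [pvFmt p.1 p.2] else acc.2
  (worst, problems)

-- membership-based selection of the worst indicator over a plain list of statuses
def pvSel (l : List String) : String :=
  if l.contains "major_outage" then "critical"
  else if l.contains "partial_outage" then "major"
  else if l.contains "under_maintenance" || l.contains "degraded_performance" then "minor"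
  else "none"

def pvCanon (w : String) : Prop := w = "none" ∨ w = "minor" ∨ w = "major" ∨ w = "critical"

-- A's max-step, as a binary operation on indicators
def pvMaxI (w ind : String) : String := if pvSev ind > pvSev w then ind else w

lemma pvSev_none : pvSev "none" = 0 := by decide
lemma pvSev_minor : pvSev "minor" = 1 := by decide
lemma pvSev_major : pvSev "major" = 2 := by decide
lemma pvSev_critical : pvSev "critical" = 3 := by decide

lemma pvInd_canon (s : String) : pvCanon (PySem.Dict.getD pvStatusToIndicator s "none") := by
  unfold pvCanon pvStatusToIndicator
  simp only [PySem.Dict.getD_eq_get?_getD, PySem.Dict.get?]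
  rcases h : List.find? (fun p => p.1 == s)
      [("operational", "none"), ("under_maintenance", "minor"), ("degraded_performance", "minor"),
       ("partial_outage", "major"), ("major_outage", "critical")] with _ | p
  · simp [h]
  · have hmem := List.mem_of_find?_eq_some h
    simp only [List.mem_cons, List.not_mem_nil, or_false] at hmem
    rcases hmem with h' | h' | h' | h' | h' <;> subst h' <;> simp [h]

lemma pvSel_canon (l : List String) : pvCanon (pvSel l) := by
  unfold pvSel pvCanon; split_ifs <;> simp

lemma pvMaxI_canon {w ind : String} (hw : pvCanon w) (hi : pvCanon ind) : pvCanon (pvMaxI w ind) := by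
  unfold pvMaxI; split_ifs <;> assumption

lemma pvMaxI_none_left {w : String} (hw : pvCanon w) : pvMaxI "none" w = w := by
  rcases hw with h | h | h | h <;> subst h <;> decide

lemma pvMaxI_none_right {w : String} (hw : pvCanon w) : pvMaxI w "none" = w := by
  rcases hw with h | h | h | h <;> subst h <;> decide

lemma pvMaxI_assoc {a b c : String} (ha : pvCanon a) (hb : pvCanon b) (hc : pvCanon c) :
    pvMaxI (pvMaxI a b) c = pvMaxI a (pvMaxI b c) := by
  rcases ha with h | h | h | h <;> rcases hb with h' | h' | h' | h' <;>
    rcases hc with h'' | h'' | h'' | h'' <;> subst h <;> subst h' <;> subst h'' <;> decide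

-- pvSel over a cons is the max-step with the head's indicator
lemma pvSel_cons (s : String) (l : List String) :
    pvSel (s :: l) = pvMaxI (PySem.Dict.getD pvStatusToIndicator s "none") (pvSel l) := by
  by_cases h1 : s = "major_outage"
  · subst h1
    simp only [pvSel, pvMaxI, List.contains_cons]
    split_ifs <;>
      simp_all [pvSev_none, pvSev_minor, pvSev_major, pvSev_critical,
        show PySem.Dict.getD pvStatusToIndicator "major_outage" "none" = "critical" by decide]
  by_cases h2 : s = "partial_outage"
  · subst h2
    simp only [pvSel, pvMaxI, List.contains_cons]
    split_ifs <;>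
      simp_all [pvSev_none, pvSev_minor, pvSev_major, pvSev_critical,
        show PySem.Dict.getD pvStatusToIndicator "partial_outage" "none" = "major" by decide]
  by_cases h3 : s = "under_maintenance"
  · subst h3
    simp only [pvSel, pvMaxI, List.contains_cons]
    split_ifs <;>
      simp_all [pvSev_none, pvSev_minor, pvSev_major, pvSev_critical,
        show PySem.Dict.getD pvStatusToIndicator "under_maintenance" "none" = "minor" by decide]
  by_cases h4 : s = "degraded_performance"
  · subst h4
    simp only [pvSel, pvMaxI, List.contains_cons]
    split_ifs <;>
      simp_all [pvSev_none, pvSev_minor, pvSev_major, pvSev_critical,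
        show PySem.Dict.getD pvStatusToIndicator "degraded_performance" "none" = "minor" by decide]
  · have hind : PySem.Dict.getD pvStatusToIndicator s "none" = "none" := by
      by_cases h5 : s = "operational"
      · subst h5; decide
      · simp [pvStatusToIndicator, PySem.Dict.getD, PySem.Dict.get?_mk_cons,
              Ne.symm h1, Ne.symm h2, Ne.symm h3, Ne.symm h4, Ne.symm h5, PySem.Dict.get?]
    rw [hind, pvMaxI_none_left (pvSel_canon l)]
    simp only [pvSel, List.contains_cons]
    have e1 : ("major_outage" == s) = false := by simpa using fun h => h1 h.symm
    have e2 : ("partial_outage" == s) = false := by simpa using fun h => h2 h.symm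
    have e3 : ("under_maintenance" == s) = false := by simpa using fun h => h3 h.symm
    have e4 : ("degraded_performance" == s) = false := by simpa using fun h => h4 h.symm
    simp [e1, e2, e3, e4]

-- A's fold, characterised: worst = pvMaxI of start and pvSel of the statuses, problems appended
lemma pvFold_eq (l : List (String × String)) (w : String) (ps : List String) (hw : pvCanon w) :
    l.foldl pvStep (w, ps)
      = (pvMaxI w (pvSel (l.map (fun p => p.2))), ps ++ pvProblems l) := by
  induction l generalizing w ps with
  | nil => simp [pvProblems, pvSel, pvMaxI_none_right hw]
  | cons p rest ih =>
      rw [List.foldl_cons,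
        show pvStep (w, ps) p
            = (pvMaxI w (PySem.Dict.getD pvStatusToIndicator p.2 "none"),
               if p.2 ≠ "operational" then ps ++ [pvFmt p.1 p.2] else ps) from rfl,
        ih _ _ (pvMaxI_canon hw (pvInd_canon p.2))]
      simp only [List.map_cons, pvSel_cons,
        pvMaxI_assoc hw (pvInd_canon p.2) (pvSel_canon _)]
      by_cases h : p.2 = "operational" <;> simp [pvProblems, h]

-- Set membership over ofList is plain list membership
lemma pvSetContains (L : List String) (x : String) :
    PySem.Set.contains (PySem.Set.ofList L) x = L.contains x := by
  rw [Bool.eq_iff_iff]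
  simp [PySem.Set.mem_ofList]

-- ===== VERDICT (by name: the statement is the Claim_ definition above) =====
theorem derive_indicator_py_spec : Claim_equal_derive_indicator_py := by
  intro statuses _
  unfold Spec_derive_indicator_py
  show statuses.foldl pvStep ("none", []) = derive_indicator_py_alt statuses
  rw [pvFold_eq statuses "none" [] (Or.inl rfl), pvMaxI_none_left (pvSel_canon _)]
  unfold derive_indicator_py_alt pvSel
  simp only [pvSetContains, List.nil_append]
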